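-- pv_equiv track=rewrite | github.com/herranka/aoc2020 | 18/18.py | encapsuled
-- ===== SOURCE A (Python) =====
-- def encapsuled(line):
--     if not line:
--         return False
--     if line[0] != "(" or line[-1] != ")":
--         return False
--     p = 1
--     i = len(line)-2
--     while p > 0 and i >= 0:
--         if line[i] == ")":
--             p += 1
--         elif line[i] == "(":
--             p -= 1
--         if p == 0:
--             break
--         i -= 1
--     return p == 0 and i == 0
-- ===== SOURCE B (Python) =====
-- def encapsuled(line):
--     if not line:
--         return False
--     if line[0] != "(" or line[-1] != ")":
--         return False
--     stack = []
--     match_pos = -1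
--     for i, c in enumerate(line):
--         if c == "(":
--             stack.append(i)
--         elif c == ")":
--             if not stack:
--                 return False
--             if stack.pop() == 0:
--                 match_pos = i
--     return match_pos == len(line) - 1
-- ===== Notes on version B (the rewrite author's own statement) =====
-- stated objective: alternative
-- what changed: Replaced A's backward counter scan (finding the '(' matching the last ')' from the right) by a single forward pass with an explicit stack of '(' indices that records where index 0 gets matched and compares it with the last position.
import Mathlib
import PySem

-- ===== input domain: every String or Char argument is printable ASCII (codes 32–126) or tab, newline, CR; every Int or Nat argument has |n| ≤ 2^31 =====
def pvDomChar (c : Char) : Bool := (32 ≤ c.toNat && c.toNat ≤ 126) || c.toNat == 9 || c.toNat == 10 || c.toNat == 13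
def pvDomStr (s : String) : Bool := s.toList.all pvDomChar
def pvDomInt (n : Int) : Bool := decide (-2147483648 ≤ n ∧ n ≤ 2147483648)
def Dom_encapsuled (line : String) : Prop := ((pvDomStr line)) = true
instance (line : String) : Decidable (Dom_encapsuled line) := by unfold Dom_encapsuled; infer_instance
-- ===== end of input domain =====

-- B replaces A's backward counter scan by a forward pass with an explicit stack of
-- '(' indices recording where index 0 is matched (alternative algorithm, same cost).

-- ===== PORT A =====
-- A's while loop: p counter, i scanning from len-2 down; stops when p hits 0 or i < 0.
-- 0 ≤ i < cs.length holds whenever the body reads cs[i], so pyGetD's default is never used.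
def aLoop (cs : List Char) (p i : Int) : Int × Int :=
  if h : 0 < p ∧ 0 ≤ i then
    let c := PySem.List.pyGetD cs i ' '
    let p' := if c = ')' then p + 1 else if c = '(' then p - 1 else p
    if p' = 0 then (p', i) else aLoop cs p' (i - 1)
  else (p, i)
termination_by (i + 1).toNat
decreasing_by omega

def encapsuled (line : String) : Bool :=
  let cs := line.toList
  if cs = [] then false
  else if ¬(PySem.List.pyGetD cs 0 ' ' = '(') ∨ ¬(PySem.List.pyGetD cs (-1) ' ' = ')') then false
  else
    let r := aLoop cs 1 ((cs.length : Int) - 2)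
    decide (r.1 = 0 ∧ r.2 = 0)

-- ===== PORT B =====
-- B's for loop: stack of indices of '(' (head = top), match_pos m; none = early `return False`.
def bLoop : List Char → Int → List Int → Int → Option Int
  | [], _i, _stack, m => some m
  | c :: rest, i, stack, m =>
    if c = '(' then bLoop rest (i + 1) (i :: stack) m
    else if c = ')' then
      match stack with
      | [] => none
      | j :: s' => bLoop rest (i + 1) s' (if j = 0 then i else m)
    else bLoop rest (i + 1) stack m

def encapsuled_alt (line : String) : Bool :=
  let cs := line.toList
  if cs = [] then false
  else if ¬(PySem.List.pyGetD cs 0 ' ' = '(') ∨ ¬(PySem.List.pyGetD cs (-1) ' ' = ')') then false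
  else
    match bLoop cs 0 [] (-1) with
    | none => false
    | some m => decide (m = (cs.length : Int) - 1)

-- ===== PRECONDITION & SPEC =====
def Spec_encapsuled (line : String) (out : Bool) : Prop := out = encapsuled_alt line
instance (line : String) (out : Bool) : Decidable (Spec_encapsuled line out) := by unfold Spec_encapsuled; infer_instance

-- ===== CLAIM (what is proved, stated in full; the proofs are below) =====
def Claim_equal_encapsuled : Prop := ∀ (line : String), Dom_encapsuled line → Spec_encapsuled line (encapsuled line)

-- ===== LEMMAS AND PROOFS =====

-- paren value of a char and balance of a prefix
def pval (c : Char) : Int := if c = '(' then 1 else if c = ')' then -1 else 0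
def pbal (l : List Char) : Int := (l.map pval).sum

lemma pbal_nil : pbal [] = 0 := rfl
lemma pbal_cons (c : Char) (l : List Char) : pbal (c :: l) = pval c + pbal l := by
  simp [pbal]
lemma pbal_append (l₁ l₂ : List Char) : pbal (l₁ ++ l₂) = pbal l₁ + pbal l₂ := by
  simp [pbal]
lemma pval_ge (c : Char) : -1 ≤ pval c := by unfold pval; split_ifs <;> omega
lemma pval_le (c : Char) : pval c ≤ 1 := by unfold pval; split_ifs <;> omega

def cLoop : List Char → Int → Nat → Bool → Int → Option Int
  | [], _i, _L, _b, m => some m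
  | c :: r, i, L, b, m =>
    if c = '(' then cLoop r (i + 1) (L + 1) (if L = 0 then decide (i = 0) else b) m
    else if c = ')' then
      if L = 0 then none
      else cLoop r (i + 1) (L - 1) (if L = 1 then false else b) (if L = 1 ∧ b = true then i else m)
    else cLoop r (i + 1) L b m

lemma bLoop_eq_cLoop (rest : List Char) : ∀ (i m : Int) (stack : List Int), 1 ≤ i →
    (∀ x ∈ stack.dropLast, x ≠ 0) →
    bLoop rest i stack m = cLoop rest i stack.length (decide (stack.getLast? = some 0)) m := by
  induction rest with
  | nil => intro i m stack _ _; rfl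
  | cons c r ih =>
    intro i m stack hi hst
    rcases eq_or_ne c '(' with hc1 | hc1
    · subst hc1
      match stack with
      | [] =>
        rw [show bLoop ('(' :: r) i [] m = bLoop r (i+1) [i] m from by simp [bLoop]]
        rw [ih (i+1) m [i] (by omega) (by simp)]
        simp [cLoop, List.getLast?_singleton]
      | y :: s =>
        rw [show bLoop ('(' :: r) i (y :: s) m = bLoop r (i+1) (i :: y :: s) m from by simp [bLoop]]
        rw [ih (i+1) m (i :: y :: s) (by omega) ?_]
        · simp [cLoop, List.getLast?_cons_cons]
        · intro x hx
          rw [List.dropLast_cons_of_ne_nil (by simp)] at hx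
          rcases List.mem_cons.mp hx with h | h
          · omega
          · exact hst x h
    · rcases eq_or_ne c ')' with hc2 | hc2
      · subst hc2
        match stack with
        | [] => simp [bLoop, cLoop]
        | j :: s =>
          rw [show bLoop (')' :: r) i (j :: s) m
              = bLoop r (i+1) s (if j = 0 then i else m) from by simp [bLoop]]
          match s with
          | [] =>
            rw [ih (i+1) _ [] (by omega) (by simp)]
            simp only [cLoop, List.length_cons, List.length_nil, List.getLast?_singleton,
              List.getLast?_nil]
            norm_num
            by_cases hj : j = 0 <;> simp [hj]
          | y :: s' =>
            have hjne : j ≠ 0 := by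
              apply hst
              rw [List.dropLast_cons_of_ne_nil (by simp)]
              exact List.mem_cons_self
            rw [if_neg hjne]
            rw [ih (i+1) m (y :: s') (by omega) ?_]
            · simp only [cLoop, List.length_cons, List.getLast?_cons_cons]
              norm_num
              exact fun h => absurd h (by decide)
            · intro x hx
              apply hst
              rw [List.dropLast_cons_of_ne_nil (by simp)]
              exact List.mem_cons_of_mem _ hx
      · rw [show bLoop (c :: r) i stack m = bLoop r (i+1) stack m from by simp [bLoop, hc1, hc2]]
        rw [ih (i+1) m stack (by omega) hst]
        simp [cLoop, hc1, hc2]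
lemma pval_paren : pval '(' = 1 := rfl
lemma pval_rparen : pval ')' = -1 := rfl
lemma pval_other (c : Char) (h1 : ¬ c = '(') (h2 : ¬ c = ')') : pval c = 0 := by
  simp [pval, h1, h2]

lemma cLoop_false (r : List Char) : ∀ (i : Int) (L : Nat) (m M : Int), 1 ≤ i →
    (cLoop r i L false m = some M ↔
      (M = m ∧ ∀ t : Nat, t ≤ r.length → 0 ≤ (L : Int) + pbal (r.take t))) := by
  induction r with
  | nil =>
    intro i L m M _
    simp only [cLoop, Option.some_inj, List.length_nil]
    constructor
    · rintro rfl
      refine ⟨rfl, ?_⟩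
      intro t ht
      interval_cases t
      simp [pbal_nil]
    · rintro ⟨rfl, _⟩; rfl
  | cons c r ih =>
    intro i L m M hi
    have htake : ∀ t : Nat, (c :: r).take (t + 1) = c :: r.take t := fun t => rfl
    rcases eq_or_ne c '(' with hc1 | hc1
    · subst hc1
      rw [show cLoop ('(' :: r) i L false m
          = cLoop r (i+1) (L+1) (if L = 0 then decide (i = 0) else false) m from by simp [cLoop]]
      rw [show (if L = 0 then decide (i = 0) else false) = false from by
        rcases Nat.eq_zero_or_pos L with h | h <;>
          simp [h, decide_eq_false (show ¬ i = 0 by omega)]]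
      rw [ih (i+1) (L+1) m M (by omega)]
      constructor
      · rintro ⟨rfl, hall⟩
        refine ⟨rfl, ?_⟩
        intro t ht
        match t with
        | 0 => simp [pbal_nil]
        | t' + 1 =>
          have := hall t' (by simpa using ht)
          rw [htake t', pbal_cons, pval_paren]
          push_cast at this ⊢
          omega
      · rintro ⟨rfl, hall⟩
        refine ⟨rfl, ?_⟩
        intro t ht
        have := hall (t + 1) (by simp; omega)
        rw [htake t, pbal_cons, pval_paren] at this
        push_cast at this ⊢
        omega
    · rcases eq_or_ne c ')' with hc2 | hc2
      · subst hc2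
        rcases Nat.eq_zero_or_pos L with hL | hL
        · subst hL
          rw [show cLoop (')' :: r) i 0 false m = none from by simp [cLoop]]
          constructor
          · intro h; simp at h
          · rintro ⟨_, hall⟩
            exfalso
            have := hall 1 (by simp)
            rw [htake 0, pbal_cons, pval_rparen] at this
            simp [pbal_nil] at this
        · rw [show cLoop (')' :: r) i L false m
              = cLoop r (i+1) (L-1) (if L = 1 then false else false) (if L = 1 ∧ false = true then i else m) from by
            simp [cLoop]; omega]
          rw [show (if L = 1 then false else false) = false from by simp]
          rw [show (if L = 1 ∧ false = true then i else m) = m from by simp]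
          rw [ih (i+1) (L-1) m M (by omega)]
          have hLc : ((L - 1 : Nat) : Int) = (L : Int) - 1 := by omega
          constructor
          · rintro ⟨rfl, hall⟩
            refine ⟨rfl, ?_⟩
            intro t ht
            match t with
            | 0 => simp [pbal_nil]
            | t' + 1 =>
              have := hall t' (by simpa using ht)
              rw [htake t', pbal_cons, pval_rparen]
              rw [hLc] at this
              omega
          · rintro ⟨rfl, hall⟩
            refine ⟨rfl, ?_⟩
            intro t ht
            have := hall (t + 1) (by simp; omega)
            rw [htake t, pbal_cons, pval_rparen] at this
            rw [hLc]
            omega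
      · rw [show cLoop (c :: r) i L false m = cLoop r (i+1) L false m from by simp [cLoop, hc1, hc2]]
        rw [ih (i+1) L m M (by omega)]
        have hv : pval c = 0 := pval_other c hc1 hc2
        constructor
        · rintro ⟨rfl, hall⟩
          refine ⟨rfl, ?_⟩
          intro t ht
          match t with
          | 0 => simp [pbal_nil]
          | t' + 1 =>
            have := hall t' (by simpa using ht)
            rw [htake t', pbal_cons, hv]
            omega
        · rintro ⟨rfl, hall⟩
          refine ⟨rfl, ?_⟩
          intro t ht
          have := hall (t + 1) (by simp; omega)
          rw [htake t, pbal_cons, hv] at this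
          omega
lemma cLoop_true (r : List Char) : ∀ (i m : Int) (L : Nat), 1 ≤ L → 1 ≤ i → m < i - 1 →
    (cLoop r i L true m = some (i + (r.length : Int) - 1) ↔
      (pbal r = -(L : Int) ∧ ∀ t : Nat, t < r.length → 1 ≤ (L : Int) + pbal (r.take t))) := by
  induction r with
  | nil =>
    intro i m L hL hi hm
    simp only [cLoop, List.length_nil, Nat.cast_zero, add_zero, Option.some_inj]
    constructor
    · intro h; omega
    · rintro ⟨h, _⟩; rw [pbal_nil] at h; omega
  | cons c r ih =>
    intro i m L hL hi hm
    have htake : ∀ t : Nat, (c :: r).take (t + 1) = c :: r.take t := fun t => rfl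
    have hlen : ((c :: r).length : Int) = (r.length : Int) + 1 := by simp
    rcases eq_or_ne c '(' with hc1 | hc1
    · subst hc1
      rw [show cLoop ('(' :: r) i L true m
          = cLoop r (i+1) (L+1) (if L = 0 then decide (i = 0) else true) m from by simp [cLoop]]
      rw [show (if L = 0 then decide (i = 0) else true) = true from by
        rw [if_neg (by omega)]]
      rw [show i + ((('(' :: r).length : Int)) - 1 = (i + 1) + (r.length : Int) - 1 from by
        rw [hlen]; ring]
      rw [ih (i+1) m (L+1) (by omega) (by omega) (by omega)]
      constructor
      · rintro ⟨hb, hall⟩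
        refine ⟨by rw [pbal_cons, pval_paren]; push_cast at hb ⊢; omega, ?_⟩
        intro t ht
        match t with
        | 0 => simp [pbal_nil]; omega
        | t' + 1 =>
          have := hall t' (by simpa using ht)
          rw [htake t', pbal_cons, pval_paren]
          push_cast at this ⊢; omega
      · rintro ⟨hb, hall⟩
        rw [pbal_cons, pval_paren] at hb
        refine ⟨by push_cast; omega, ?_⟩
        intro t ht
        have := hall (t + 1) (by simp; omega)
        rw [htake t, pbal_cons, pval_paren] at this
        push_cast at this ⊢; omega
    · rcases eq_or_ne c ')' with hc2 | hc2
      · subst hc2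
        rcases eq_or_ne L 1 with hL1 | hL1
        · subst hL1
          rw [show cLoop (')' :: r) i 1 true m = cLoop r (i+1) 0 false i from by
            simp [cLoop]]
          rw [cLoop_false r (i+1) 0 i (i + ((')' :: r).length : Int) - 1) (by omega)]
          constructor
          · rintro ⟨heq, hall⟩
            have hr0 : r.length = 0 := by rw [hlen] at heq; omega
            have hrnil : r = [] := List.eq_nil_of_length_eq_zero hr0
            subst hrnil
            refine ⟨by simp [pbal_cons, pval_rparen, pbal_nil], ?_⟩
            intro t ht
            simp at ht
            subst ht
            simp [pbal_nil]
          · rintro ⟨hb, hall⟩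
            match hr : r with
            | [] =>
              refine ⟨by simp, ?_⟩
              intro t ht
              simp at ht
              subst ht
              simp [pbal_nil]
            | y :: r' =>
              exfalso
              have := hall 1 (by simp)
              rw [htake 0, pbal_cons, pval_rparen] at this
              simp [pbal_nil] at this
        · rw [show cLoop (')' :: r) i L true m
              = cLoop r (i+1) (L-1) true m from by
            simp [cLoop, hL1]; omega]
          rw [show i + ((')' :: r).length : Int) - 1 = (i + 1) + (r.length : Int) - 1 from by
            rw [hlen]; ring]
          rw [ih (i+1) m (L-1) (by omega) (by omega) (by omega)]
          have hLc : ((L - 1 : Nat) : Int) = (L : Int) - 1 := by omega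
          constructor
          · rintro ⟨hb, hall⟩
            rw [hLc] at hb
            refine ⟨by rw [pbal_cons, pval_rparen]; omega, ?_⟩
            intro t ht
            match t with
            | 0 => simp [pbal_nil]; omega
            | t' + 1 =>
              have := hall t' (by simpa using ht)
              rw [htake t', pbal_cons, pval_rparen]
              rw [hLc] at this; omega
          · rintro ⟨hb, hall⟩
            rw [pbal_cons, pval_rparen] at hb
            refine ⟨by rw [hLc]; omega, ?_⟩
            intro t ht
            have := hall (t + 1) (by simp; omega)
            rw [htake t, pbal_cons, pval_rparen] at this
            rw [hLc]; omega
      · rw [show cLoop (c :: r) i L true m = cLoop r (i+1) L true m from by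
          simp [cLoop, hc1, hc2]]
        rw [show i + ((c :: r).length : Int) - 1 = (i + 1) + (r.length : Int) - 1 from by
          rw [hlen]; ring]
        rw [ih (i+1) m L (by omega) (by omega) (by omega)]
        have hv : pval c = 0 := pval_other c hc1 hc2
        constructor
        · rintro ⟨hb, hall⟩
          refine ⟨by rw [pbal_cons, hv]; omega, ?_⟩
          intro t ht
          match t with
          | 0 => simp [pbal_nil]; omega
          | t' + 1 =>
            have := hall t' (by simpa using ht)
            rw [htake t', pbal_cons, hv]
            omega
        · rintro ⟨hb, hall⟩
          rw [pbal_cons, hv] at hb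
          refine ⟨by omega, ?_⟩
          intro t ht
          have := hall (t + 1) (by simp; omega)
          rw [htake t, pbal_cons, hv] at this
          omega
lemma take_succ_getElem (cs : List Char) (k : Nat) (h : k < cs.length) :
    cs.take (k + 1) = cs.take k ++ [cs[k]] := by
  rw [List.take_add_one]
  simp [List.getElem?_eq_getElem h]

lemma aLoop_spec (cs : List Char) : ∀ (N : Nat) (p i : Int), (i + 1).toNat = N →
    -1 ≤ i → i < (cs.length : Int) → 1 ≤ p →
    (aLoop cs p i = (0, 0) ↔
      (p = pbal (cs.take (i + 1).toNat) ∧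
        ∀ k : Nat, 1 ≤ k → (k : Int) ≤ i → pbal (cs.take k) ≠ 0)) := by
  intro N
  induction N with
  | zero =>
    intro p i h0 h1 _ h3
    have hi : i = -1 := by omega
    subst hi
    rw [aLoop, dif_neg (by omega)]
    constructor
    · intro h
      exfalso
      have := congrArg Prod.fst h
      simp at this
      omega
    · rintro ⟨hp, _⟩
      exfalso
      norm_num [pbal_nil] at hp
      omega
  | succ N ihN =>
    intro p i h0 h1 h2 h3
    have hi0 : 0 ≤ i := by omega
    have hilt : i.toNat < cs.length := by omega
    rw [aLoop, dif_pos ⟨by omega, hi0⟩]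
    have hgd : PySem.List.pyGetD cs i ' ' = cs[i.toNat] :=
      PySem.List.pyGetD_eq_getElem cs ' ' hi0 h2
    set c := cs[i.toNat] with hcdef
    have hpv : (if PySem.List.pyGetD cs i ' ' = ')' then p + 1
        else if PySem.List.pyGetD cs i ' ' = '(' then p - 1 else p) = p - pval c := by
      rw [hgd]
      rcases eq_or_ne c ')' with h | h
      · simp [h, pval_rparen]
      · rcases eq_or_ne c '(' with h' | h'
        · simp [h', pval_paren]
        · simp [h, h', pval_other c h' h]
    simp only [hpv]
    have hiN : (i + 1).toNat = N + 1 := h0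
    have htN : i.toNat = N := by omega
    have htake1 : cs.take (i + 1).toNat = cs.take i.toNat ++ [c] := by
      rw [show (i + 1).toNat = i.toNat + 1 by omega]
      exact take_succ_getElem cs i.toNat hilt
    have hbal1 : pbal (cs.take (i + 1).toNat) = pbal (cs.take i.toNat) + pval c := by
      rw [htake1, pbal_append, pbal_cons, pbal_nil]; ring
    rcases eq_or_ne (p - pval c) 0 with hz | hz
    · rw [if_pos hz]
      constructor
      · intro h
        have h2' := congrArg Prod.snd h
        simp at h2'
        subst h2'
        refine ⟨?_, ?_⟩
        · rw [show (0 + 1 : Int).toNat = 1 by decide]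
          have : cs.take 1 = cs.take 0 ++ [cs[0]] := take_succ_getElem cs 0 (by omega)
          rw [this]
          simp only [List.take_zero, List.nil_append, pbal_cons, pbal_nil]
          have hc0 : c = cs[0] := rfl
          rw [← hc0]
          omega
        · intro k hk1 hk2; omega
      · rintro ⟨hp, hall⟩
        rcases eq_or_ne i 0 with h | h
        · rw [hz, h]
        · exfalso
          have h1le : 1 ≤ i.toNat := by omega
          have := hall i.toNat (by omega) (by omega)
          apply this
          omega
    · rw [if_neg hz]
      have hp'1 : 1 ≤ p - pval c := by
        have := pval_le c
        omega
      rw [ihN (p - pval c) (i - 1) (by omega) (by omega) (by omega) hp'1]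
      have htk : (i - 1 + 1).toNat = i.toNat := by omega
      rw [htk]
      constructor
      · rintro ⟨hp, hall⟩
        have hbi : pbal (cs.take i.toNat) ≠ 0 := by omega
        refine ⟨by omega, ?_⟩
        intro k hk1 hk2
        rcases eq_or_ne (k : Int) i with h | h
        · rw [show k = i.toNat by omega]
          exact hbi
        · exact hall k hk1 (by omega)
      · rintro ⟨hp, hall⟩
        refine ⟨by omega, ?_⟩
        intro k hk1 hk2
        exact hall k hk1 (by omega)

lemma bal_pos (cs : List Char) (h1 : pbal (cs.take 1) = 1)
    (hne : ∀ k : Nat, 1 ≤ k → k ≤ cs.length - 1 → pbal (cs.take k) ≠ 0) :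
    ∀ k : Nat, 1 ≤ k → k ≤ cs.length - 1 → 1 ≤ pbal (cs.take k) := by
  intro k
  induction k with
  | zero => omega
  | succ k ih =>
    intro _ hk1
    by_cases hk0 : k = 0
    · subst hk0; exact le_of_eq h1.symm
    · have hklt : k < cs.length := by omega
      have hrec : cs.take (k + 1) = cs.take k ++ [cs[k]] := take_succ_getElem cs k hklt
      have hge : 1 ≤ pbal (cs.take k) := ih (by omega) (by omega)
      have hne' : pbal (cs.take (k + 1)) ≠ 0 := hne (k + 1) (by omega) (by omega)
      have hv := pval_ge cs[k]
      rw [hrec, pbal_append] at hne' ⊢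
      simp only [pbal_cons, pbal_nil] at hne' ⊢
      omega
theorem encapsuled_spec : Claim_equal_encapsuled := by
  intro line _
  unfold Spec_encapsuled encapsuled encapsuled_alt
  simp only []
  generalize line.toList = cs
  rcases hcs : cs with _ | ⟨c, rest⟩
  · simp
  · rw [if_neg (show ¬((c :: rest : List Char) = []) from by simp)]
    by_cases hg : ¬(PySem.List.pyGetD (c :: rest) 0 ' ' = '(') ∨
        ¬(PySem.List.pyGetD (c :: rest) (-1) ' ' = ')')
    · rw [if_pos hg, if_pos hg]
      simp
    · rw [if_neg hg, if_neg hg]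
      obtain ⟨hg0', hg1'⟩ := not_or.mp hg
      have hg0 := not_not.mp hg0'
      have hg1 := not_not.mp hg1'
      rw [PySem.List.pyGetD_zero_cons] at hg0
      subst hg0
      have hne : ('(' : Char) :: rest ≠ [] := by simp
      rw [PySem.List.pyGetD_neg_one _ ' ' hne] at hg1
      have hrest : rest ≠ [] := by
        rintro rfl
        simp [List.getLast] at hg1
      have hR : 1 ≤ rest.length := List.length_pos_iff.mpr hrest
      set cs' := ('(' : Char) :: rest with hcs'
      have hn : cs'.length = rest.length + 1 := by simp [hcs']
      -- A-side characterization
      have hA := aLoop_spec cs' ((rest.length : Nat)) 1 ((cs'.length : Int) - 2)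
        (by omega) (by omega) (by omega) (by omega)
      rw [show ((cs'.length : Int) - 2 + 1).toNat = rest.length by omega] at hA
      -- take facts
      have hF1 : ∀ t : Nat, pbal (cs'.take (t + 1)) = 1 + pbal (rest.take t) := by
        intro t
        rw [show cs'.take (t + 1) = '(' :: rest.take t from rfl, pbal_cons, pval_paren]
      have hF2 : pbal cs' = 1 + pbal rest := by
        rw [hcs', pbal_cons, pval_paren]
      have hdl : cs'.dropLast ++ [')'] = cs' := by
        rw [← hg1]
        exact List.dropLast_append_getLast hne
      have hF3 : pbal cs' = pbal (cs'.take rest.length) - 1 := by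
        conv_lhs => rw [← hdl]
        rw [pbal_append, pbal_cons, pbal_nil, pval_rparen, List.dropLast_eq_take]
        rw [show cs'.length - 1 = rest.length by omega]
        ring
      -- B-side characterization
      have hBstep : bLoop cs' 0 [] (-1) = cLoop rest 1 1 true (-1) := by
        rw [show bLoop cs' 0 [] (-1) = bLoop rest 1 [0] (-1) from by simp [hcs', bLoop]]
        rw [bLoop_eq_cLoop rest 1 (-1) [0] (by omega) (by simp)]
        simp [List.getLast?_singleton]
      have hB := cLoop_true rest 1 (-1) 1 (by omega) (by omega) (by omega)
      -- bridge: RA ↔ RB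
      have hbridge :
          ((1 : Int) = pbal (cs'.take rest.length) ∧
            ∀ k : Nat, 1 ≤ k → (k : Int) ≤ (cs'.length : Int) - 2 → pbal (cs'.take k) ≠ 0) ↔
          (pbal rest = -(1 : Int) ∧
            ∀ t : Nat, t < rest.length → 1 ≤ (1 : Int) + pbal (rest.take t)) := by
        constructor
        · rintro ⟨h1, h2⟩
          have hb0 : pbal rest = -1 := by omega
          refine ⟨hb0, ?_⟩
          have hpos := bal_pos cs' (by rw [hF1 0]; simp [pbal_nil]) ?_
          · intro t ht
            have := hpos (t + 1) (by omega) (by omega)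
            rw [hF1 t] at this
            omega
          · intro k hk1 hk2
            rcases eq_or_ne k rest.length with h | h
            · rw [h, ← h1]; omega
            · exact h2 k hk1 (by omega)
        · rintro ⟨h1, h2⟩
          refine ⟨by omega, ?_⟩
          intro k hk1 hk2
          have hk' : k - 1 < rest.length := by omega
          have := h2 (k - 1) hk'
          rw [show k = (k - 1) + 1 by omega, hF1]
          omega
      -- finish by cases on the B-loop result
      rw [hBstep]
      rcases hres : cLoop rest 1 1 true (-1) with _ | m
      · simp only []
        apply decide_eq_false
        intro hand
        have hpair : aLoop cs' 1 ((cs'.length : Int) - 2) = (0, 0) :=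
          Prod.ext_iff.mpr ⟨hand.1, hand.2⟩
        have hcl := hB.mpr (hbridge.mp (hA.mp hpair))
        rw [hres] at hcl
        simp at hcl
      · simp only []
        by_cases hm : m = (cs'.length : Int) - 1
        · have hsome : cLoop rest 1 1 true (-1) = some (1 + (rest.length : Int) - 1) := by
            rw [hres]
            congr 1
            omega
          have hpair := hA.mpr (hbridge.mpr (hB.mp hsome))
          rw [hpair]
          simp [hm]
        · rw [decide_eq_false hm]
          apply decide_eq_false
          intro hand
          have hpair : aLoop cs' 1 ((cs'.length : Int) - 2) = (0, 0) :=
            Prod.ext_iff.mpr ⟨hand.1, hand.2⟩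
          have hcl := hB.mpr (hbridge.mp (hA.mp hpair))
          rw [hres] at hcl
          simp at hcl
          omega
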